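-- pv_equiv track=rewrite | github.com/MelikeSila/group-formation-for-autonomous-vehicles | brute_force/possible_group_assignments.py | k_partitions
-- ===== SOURCE A (Python) =====
-- def k_partitions(seq, k):
--     """Returns a list of all unique k-partitions of `seq`.
--
--     Each partition is a list of parts, and each part is a tuple.
--
--
--     """
--     n = len(seq)
--     groups = []  # a list of lists, currently empty
--
--     def generate_partitions(i):
--         if i >= n:
--             yield list(map(tuple, groups))
--         else:
--             if n - i > k - len(groups):
--                 for group in groups:
--                     group.append(seq[i])
--                     yield from generate_partitions(i + 1)
--                     group.pop()
--
--             if len(groups) < k: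
--                 groups.append([seq[i]])
--                 yield from generate_partitions(i + 1)
--                 groups.pop()
--
--     result = generate_partitions(0)
--
--     return result
-- ===== SOURCE B (Python) =====
-- def k_partitions(seq, k):
--     """Returns a generator of all unique k-partitions of `seq` (each partition a
--     list of tuples), using an explicit stack/work-list instead of recursion."""
--     n = len(seq)
--
--     def gen():
--         stack = [(0, ())]  # frames: (next index, groups so far as tuple of tuples)
--         while stack:
--             i, groups = stack.pop()
--             if i >= n:
--                 yield [tuple(g) for g in groups]
--             else:
--                 x = seq[i]
--                 # push the 'start a new group' branch first so it is explored last
--                 if len(groups) < k: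
--                     stack.append((i + 1, groups + ((x,),)))
--                 # push the 'append to existing group' branches in reverse so that
--                 # group 0 ends up on top of the stack (explored first)
--                 if n - i > k - len(groups):
--                     for j in range(len(groups) - 1, -1, -1):
--                         stack.append((i + 1, groups[:j] + (groups[j] + (x,),) + groups[j + 1:]))
--
--     return gen()
-- ===== Notes on version B (the rewrite author's own statement) =====
-- stated objective: alternative
-- what changed: Replaces A's recursive closure-mutating generator with an explicit stack/work-list generator over immutable per-frame copies of the groups, pushing continuation frames so the yield order is identical.
import Mathlib
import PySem

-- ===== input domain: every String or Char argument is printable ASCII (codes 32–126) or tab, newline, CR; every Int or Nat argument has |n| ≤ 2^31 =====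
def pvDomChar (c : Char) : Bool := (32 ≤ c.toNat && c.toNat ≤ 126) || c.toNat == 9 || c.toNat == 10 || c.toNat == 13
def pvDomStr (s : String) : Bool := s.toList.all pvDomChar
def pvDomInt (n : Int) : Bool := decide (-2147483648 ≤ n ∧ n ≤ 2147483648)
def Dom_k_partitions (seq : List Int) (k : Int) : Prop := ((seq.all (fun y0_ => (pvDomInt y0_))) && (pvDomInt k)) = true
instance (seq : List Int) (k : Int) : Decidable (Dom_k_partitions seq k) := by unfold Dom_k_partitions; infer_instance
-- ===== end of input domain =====

-- B replaces A's recursive generator by an explicit stack/work-list loop over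
-- immutable frames (objective: alternative decomposition, same cost).
-- Both Pythons return a generator; the equivalence is about the materialised
-- sequence of yielded partitions (the ports return that list directly).

-- ===== PORT A =====
-- generate_partitions(i), with the closure-mutated `groups` made an explicit
-- argument: appending to group j then popping = recursing on the updated list.
def gpA (seq : List Int) (k : Int) (i : Nat) (groups : List (List Int)) :
    List (List (List Int)) :=
  if i ≥ seq.length then [groups]
  else
    (if (seq.length : Int) - i > k - groups.length then
       (List.range groups.length).flatMap
         (fun j => gpA seq k (i + 1) (groups.set j (groups.getD j [] ++ [seq.getD i 0])))
     else [])
    ++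
    (if (groups.length : Int) < k then gpA seq k (i + 1) (groups ++ [[seq.getD i 0]]) else [])
termination_by seq.length - i
decreasing_by all_goals omega

def k_partitions (seq : List Int) (k : Int) : List (List (List Int)) :=
  gpA seq k 0 []

-- ===== PORT B =====
-- The frames pushed for one popped frame (i, gs).  The Lean stack keeps the TOP
-- at the HEAD, so the Python order (push 'new group' first, then the 'append to
-- group j' frames for j = len-1 .. 0) appears here as:
-- append-frames j = 0 .. len-1, then the new-group frame, all prepended.
def childrenB (seq : List Int) (k : Int) (i : Nat) (gs : List (List Int)) :
    List (Nat × List (List Int)) :=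
  (if (seq.length : Int) - i > k - gs.length then
     (List.range gs.length).map
       (fun j => (i + 1, gs.set j (gs.getD j [] ++ [seq.getD i 0])))
   else [])
  ++
  (if (gs.length : Int) < k then [(i + 1, gs ++ [[seq.getD i 0]])] else [])

theorem childrenB_fst (seq : List Int) (k : Int) (i : Nat) (gs : List (List Int)) :
    ∀ f ∈ childrenB seq k i gs, f.1 = i + 1 := by
  intro f hf
  simp only [childrenB, List.mem_append] at hf
  rcases hf with hf | hf <;> split at hf <;>
    simp_all [List.mem_map] <;> (obtain ⟨j, _, rfl⟩ := hf; rfl)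

-- totality fuel for the work-list loop: the number of pops needed for a frame
def treeSize (seq : List Int) (k : Int) (i : Nat) (gs : List (List Int)) : Nat :=
  if i ≥ seq.length then 1
  else 1 + ((childrenB seq k i gs).attach.map (fun f => treeSize seq k f.1.1 f.1.2)).sum
termination_by seq.length - i
decreasing_by
  have := childrenB_fst seq k i gs _ f.2
  omega

-- the while-loop over the explicit stack (fuel only makes it structurally total)
def runB (seq : List Int) (k : Int) : Nat → List (Nat × List (List Int)) →
    List (List (List Int))
  | _, [] => []
  | 0, _ :: _ => []
  | fuel + 1, (i, gs) :: rest =>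
      if i ≥ seq.length then gs :: runB seq k fuel rest
      else runB seq k fuel (childrenB seq k i gs ++ rest)

def k_partitions_alt (seq : List Int) (k : Int) : List (List (List Int)) :=
  runB seq k (treeSize seq k 0 []) [(0, [])]

-- ===== PRECONDITION & SPEC =====
def Spec_k_partitions (seq : List Int) (k : Int) (out : List (List (List Int))) : Prop := out = k_partitions_alt seq k
instance (seq : List Int) (k : Int) (out : List (List (List Int))) : Decidable (Spec_k_partitions seq k out) := by unfold Spec_k_partitions; infer_instance

-- ===== CLAIM (what is proved, stated in full; the proofs are below) =====
def Claim_equal_k_partitions : Prop := ∀ (seq : List Int) (k : Int), Dom_k_partitions seq k → Spec_k_partitions seq k (k_partitions seq k)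

-- ===== LEMMAS AND PROOFS =====

def stackFuel (seq : List Int) (k : Int) (stack : List (Nat × List (List Int))) : Nat :=
  (stack.map (fun f => treeSize seq k f.1 f.2)).sum

theorem treeSize_children (seq : List Int) (k : Int) (i : Nat) (gs : List (List Int))
    (h : ¬ i ≥ seq.length) :
    treeSize seq k i gs = 1 + stackFuel seq k (childrenB seq k i gs) := by
  rw [treeSize, if_neg h, stackFuel]
  congr 2
  rw [List.map_attach_eq_pmap]
  exact @List.pmap_eq_map _ _ _ (fun f => treeSize seq k f.1 f.2) (childrenB seq k i gs) _

theorem treeSize_pos (seq : List Int) (k : Int) (i : Nat) (gs : List (List Int)) :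
    1 ≤ treeSize seq k i gs := by
  by_cases h : i ≥ seq.length
  · rw [treeSize, if_pos h]
  · rw [treeSize_children seq k i gs h]; omega

theorem gpA_children (seq : List Int) (k : Int) (i : Nat) (gs : List (List Int))
    (h : ¬ i ≥ seq.length) :
    gpA seq k i gs = (childrenB seq k i gs).flatMap (fun f => gpA seq k f.1 f.2) := by
  rw [gpA, if_neg h, childrenB, List.flatMap_append]
  congr 1
  · split
    · rw [List.flatMap_map]
    · simp
  · split <;> simp

theorem runB_spec (seq : List Int) (k : Int) :
    ∀ (fuel : Nat) (stack : List (Nat × List (List Int))),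
      stackFuel seq k stack ≤ fuel →
      runB seq k fuel stack = stack.flatMap (fun f => gpA seq k f.1 f.2) := by
  intro fuel
  induction fuel with
  | zero =>
      intro stack hle
      match stack with
      | [] => rfl
      | (i, gs) :: rest =>
          exfalso
          have h1 := treeSize_pos seq k i gs
          simp [stackFuel] at hle
          omega
  | succ fuel ih =>
      intro stack hle
      match stack with
      | [] => rfl
      | (i, gs) :: rest =>
          by_cases h : i ≥ seq.length
          · have hts : treeSize seq k i gs = 1 := by rw [treeSize, if_pos h]
            rw [runB, if_pos h, ih rest (by simp [stackFuel, hts] at hle ⊢; omega)]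
            simp only [List.flatMap_cons]
            rw [gpA, if_pos h]
            rfl
          · rw [runB, if_neg h,
              ih (childrenB seq k i gs ++ rest)
                (by
                  have := treeSize_children seq k i gs h
                  simp [stackFuel, List.map_append] at hle ⊢
                  simp [stackFuel] at this
                  omega)]
            rw [List.flatMap_append, List.flatMap_cons, gpA_children seq k i gs h]

-- ===== VERDICT (by name: the statement is the Claim_ definition above) =====
theorem k_partitions_spec : Claim_equal_k_partitions := by
  intro seq k _
  unfold Spec_k_partitions k_partitions k_partitions_alt
  rw [runB_spec seq k _ _ (by simp [stackFuel])]
  simp
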